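-- pv_equiv track=rewrite | github.com/calceusHD/master | qc_decoder_gen.py | gen_record
-- ===== SOURCE A (Python) =====
-- def gen_record(names, widths):
--     s = 0
--     rv = ""
--     for i in range(len(names)):
--         rv += "rv(" + str(s + widths[i]) + "-1"
--         if widths[i] != 1:
--             rv += " downto " + str(s)
--         rv += ") := "
--         if widths[i] == 1:
--             rv += "int_in." + names[i]
--         else:
--             rv += "std_logic_vector(int_in." + names[i] + ")"
--         rv += ";\n"
--         s += widths[i]
--     return rv
-- ===== SOURCE B (Python) =====
-- def gen_record(names, widths):
--     # Back-to-front: start from the total bit count and walk the records in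
--     # reverse, subtracting each width to recover its base offset; collect the
--     # lines (in reverse), then reverse and join.
--     n = len(names)
--     hi = sum(widths[:n])
--     parts = []
--     for i in range(n - 1, -1, -1):
--         w = widths[i]
--         hi -= w
--         if w == 1:
--             line = "rv(" + str(hi + w) + "-1) := int_in." + names[i] + ";\n"
--         else:
--             line = ("rv(" + str(hi + w) + "-1 downto " + str(hi)
--                     + ") := std_logic_vector(int_in." + names[i] + ");\n")
--         parts.append(line)
--     parts.reverse()
--     return "".join(parts)
-- ===== Notes on version B (the rewrite author's own statement) =====
-- stated objective: alternative
-- what changed: B traverses the records back-to-front: it first computes the total bit count sum(widths[:n]), then iterates in reverse, recovering each record's base offset by subtracting its width from the running total, collecting the lines and reversing them before one join, instead of A's forward pass with a running prefix sum and appending string concatenation.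
import Mathlib
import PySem

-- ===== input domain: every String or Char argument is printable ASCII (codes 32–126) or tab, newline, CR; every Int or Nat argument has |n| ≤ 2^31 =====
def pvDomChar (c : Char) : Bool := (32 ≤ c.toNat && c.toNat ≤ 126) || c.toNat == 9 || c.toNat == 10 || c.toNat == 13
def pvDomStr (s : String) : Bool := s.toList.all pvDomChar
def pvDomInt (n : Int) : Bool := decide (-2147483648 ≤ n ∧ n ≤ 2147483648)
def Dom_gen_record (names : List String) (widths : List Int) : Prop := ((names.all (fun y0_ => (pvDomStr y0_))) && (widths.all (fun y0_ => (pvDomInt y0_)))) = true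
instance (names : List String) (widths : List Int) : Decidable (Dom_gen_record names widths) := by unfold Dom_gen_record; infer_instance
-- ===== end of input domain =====

-- B walks the records BACK-TO-FRONT: it starts from the total bit count sum(widths[:n]) and, iterating in
-- reverse, subtracts each width to recover that record's base offset, prepending each formatted line;
-- same output as A's forward running-accumulator concatenation (objective: alternative).

-- ===== PORT A =====
-- literal transliteration of A: index loop over range(len(names)) with running offset s and growing string rv
def gen_record (names : List String) (widths : List Int) : String :=
  ((PySem.List.pyRange 0 (names.length : Int) 1).foldl
    (fun (st : Int × String) i =>
      let s := st.1
      let w := PySem.List.pyGetD widths i 0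
      let nm := PySem.List.pyGetD names i ""
      let rv := st.2 ++ "rv(" ++ PySem.Int.toStr (s + w) ++ "-1"
      let rv := if w ≠ 1 then rv ++ " downto " ++ PySem.Int.toStr s else rv
      let rv := rv ++ ") := "
      let rv := if w = 1 then rv ++ "int_in." ++ nm
                else rv ++ "std_logic_vector(int_in." ++ nm ++ ")"
      (s + w, rv ++ ";\n")) ((0 : Int), "")).2

-- ===== PORT B =====
-- literal transliteration of Source B: hi = sum(widths[:n]); for i in range(n-1, -1, -1): hi -= w;
-- parts.append(line); then parts.reverse() and "".join(parts)
def gen_record_alt (names : List String) (widths : List Int) : String :=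
  let n : Int := (names.length : Int)
  let hi0 : Int := (PySem.List.slice widths none (some n)).sum
  let parts := ((PySem.List.pyRange (n - 1) (-1) (-1)).foldl
    (fun (st : Int × List String) i =>
      let w := PySem.List.pyGetD widths i 0
      let hi := st.1 - w
      let line :=
        if w = 1 then
          "rv(" ++ PySem.Int.toStr (hi + w) ++ "-1) := int_in." ++ PySem.List.pyGetD names i "" ++ ";\n"
        else
          "rv(" ++ PySem.Int.toStr (hi + w) ++ "-1 downto " ++ PySem.Int.toStr hi
            ++ ") := std_logic_vector(int_in." ++ PySem.List.pyGetD names i "" ++ ");\n"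
      (hi, st.2 ++ [line])) (hi0, ([] : List String))).2
  String.join parts.reverse

-- ===== PRECONDITION & SPEC =====
-- Pre_ excludes only inputs where both Pythons raise IndexError (widths shorter than names)
def Pre_gen_record (names : List String) (widths : List Int) : Prop :=
  names.length ≤ widths.length
instance (names : List String) (widths : List Int) : Decidable (Pre_gen_record names widths) := by unfold Pre_gen_record; infer_instance
def pvWitness_gen_record : List String × List Int := (["flag", "data"], [1, 8])

def Spec_gen_record (names : List String) (widths : List Int) (out : String) : Prop := out = gen_record_alt names widths
instance (names : List String) (widths : List Int) (out : String) : Decidable (Spec_gen_record names widths out) := by unfold Spec_gen_record; infer_instance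

-- ===== CLAIM (what is proved, stated in full; the proofs are below) =====
def Claim_equal_gen_record : Prop := ∀ (names : List String) (widths : List Int), Dom_gen_record names widths → Pre_gen_record names widths → Spec_gen_record names widths (gen_record names widths)

-- ===== LEMMAS AND PROOFS =====

-- reference shape shared by both proofs: one formatted record line, and the lines of the whole output
def pvFmt (name : String) (w base : Int) : String :=
  if w = 1 then "rv(" ++ PySem.Int.toStr (base + w) ++ "-1) := int_in." ++ name ++ ";\n"
  else "rv(" ++ PySem.Int.toStr (base + w) ++ "-1 downto " ++ PySem.Int.toStr base ++ ") := std_logic_vector(int_in." ++ name ++ ");\n"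

def pvLines : List String → List Int → Int → String
  | n :: ns, w :: ws, s => pvFmt n w s ++ pvLines ns ws (s + w)
  | _, _, _ => ""

-- one step of A's loop body builds exactly pvFmt
lemma bodyA_fmt (rv : String) (n : String) (w s : Int) :
    (let rv1 := rv ++ "rv(" ++ PySem.Int.toStr (s + w) ++ "-1"
     let rv2 := if w ≠ 1 then rv1 ++ " downto " ++ PySem.Int.toStr s else rv1
     let rv3 := rv2 ++ ") := "
     let rv4 := if w = 1 then rv3 ++ "int_in." ++ n
                else rv3 ++ "std_logic_vector(int_in." ++ n ++ ")"
     rv4 ++ ";\n") = rv ++ pvFmt n w s := by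
  by_cases hw : w = 1 <;>
    simp only [hw, pvFmt, if_pos, if_neg, not_false_iff] <;> simp [hw, String.append_assoc]

-- A's index fold computes pvLines
lemma foldA_eq (ns : List String) : ∀ (ws : List Int) (s : Int) (rv : String), ns.length ≤ ws.length →
    ((List.range ns.length).foldl
      (fun (st : Int × String) (k : Nat) =>
        let s := st.1
        let w := ws.getD k 0
        let nm := ns.getD k ""
        let rv := st.2 ++ "rv(" ++ PySem.Int.toStr (s + w) ++ "-1"
        let rv := if w ≠ 1 then rv ++ " downto " ++ PySem.Int.toStr s else rv
        let rv := rv ++ ") := "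
        let rv := if w = 1 then rv ++ "int_in." ++ nm
                  else rv ++ "std_logic_vector(int_in." ++ nm ++ ")"
        (s + w, rv ++ ";\n")) (s, rv)).2 = rv ++ pvLines ns ws s := by
  induction ns with
  | nil => intro ws s rv _; simp [pvLines]
  | cons n ns ih =>
    intro ws s rv h
    cases ws with
    | nil => simp at h
    | cons w ws =>
      rw [List.length_cons, List.range_succ_eq_map, List.foldl_cons, List.foldl_map]
      simp only [List.getD_cons_zero, List.getD_cons_succ, Nat.succ_eq_add_one]
      rw [bodyA_fmt rv n w s]
      rw [ih ws (s + w) (rv ++ pvFmt n w s) (by simpa using h)]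
      simp [pvLines, String.append_assoc]

-- the list of record lines, front to back
def pvLineList : List String → List Int → Int → List String
  | n :: ns, w :: ws, s => pvFmt n w s :: pvLineList ns ws (s + w)
  | _, _, _ => []

lemma join_foldl_shift (l : List String) : ∀ (a : String),
    l.foldl (fun r s => r ++ s) a = a ++ l.foldl (fun r s => r ++ s) "" := by
  induction l with
  | nil => intro a; simp
  | cons b l ih => intro a; simp only [List.foldl_cons]; rw [ih (a ++ b), ih ("" ++ b)]
                   simp [String.append_assoc]

lemma join_cons (a : String) (l : List String) : String.join (a :: l) = a ++ String.join l := by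
  simp only [String.join, List.foldl_cons]
  rw [join_foldl_shift l ("" ++ a)]; simp

lemma join_lineList (ns : List String) : ∀ (ws : List Int) (s : Int),
    String.join (pvLineList ns ws s) = pvLines ns ws s := by
  induction ns with
  | nil => intro ws s; cases ws <;> simp [pvLineList, pvLines, String.join]
  | cons n ns ih =>
    intro ws s
    cases ws with
    | nil => simp [pvLineList, pvLines, String.join]
    | cons w ws => simp [pvLineList, pvLines, join_cons, ih]

-- B's reverse walk as a foldr over the index range collects the lines reversed
lemma foldB_eq (ns : List String) : ∀ (ws : List Int) (s : Int) (acc : List String), ns.length ≤ ws.length →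
    ((List.range ns.length).foldr
      (fun (k : Nat) (st : Int × List String) =>
        let w := ws.getD k 0
        let hi := st.1 - w
        let line :=
          if w = 1 then
            "rv(" ++ PySem.Int.toStr (hi + w) ++ "-1) := int_in." ++ ns.getD k "" ++ ";\n"
          else
            "rv(" ++ PySem.Int.toStr (hi + w) ++ "-1 downto " ++ PySem.Int.toStr hi
              ++ ") := std_logic_vector(int_in." ++ ns.getD k "" ++ ");\n"
        (hi, st.2 ++ [line])) (s + (ws.take ns.length).sum, acc))
      = (s, acc ++ (pvLineList ns ws s).reverse) := by
  induction ns with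
  | nil => intro ws s acc _; simp [pvLineList]
  | cons n ns ih =>
    intro ws s acc h
    cases ws with
    | nil => simp at h
    | cons w ws =>
      rw [List.length_cons, List.range_succ_eq_map, List.foldr_cons, List.foldr_map]
      simp only [List.getD_cons_zero, List.getD_cons_succ, Nat.succ_eq_add_one]
      have hsum : s + ((w :: ws).take (ns.length + 1)).sum = (s + w) + (ws.take ns.length).sum := by
        simp [List.take_succ_cons]; ring
      rw [hsum, ih ws (s + w) acc (by simpa using h)]
      simp only [pvFmt, pvLineList]
      have hhi : s + w - w = s := by ring
      rw [hhi]
      by_cases hw : w = 1 <;> simp [hw]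

-- ===== VERDICT (by name: the statement is the Claim_ definition above) =====
theorem gen_record_spec : Claim_equal_gen_record := by
  intro names widths _ hpre
  unfold Spec_gen_record gen_record gen_record_alt
  rw [PySem.List.pyRange_zero_nat, List.foldl_map]
  simp only [PySem.List.pyGetD_natCast]
  rw [foldA_eq names widths 0 "" hpre]
  have hr : PySem.List.pyRange ((names.length : Int) - 1) (-1) (-1)
      = (PySem.List.pyRange 0 (names.length : Int) 1).reverse := by
    rw [PySem.List.pyRange_neg_one_eq_reverse]; norm_num
  rw [hr, List.foldl_reverse, PySem.List.pyRange_zero_nat, List.foldr_map]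
  simp only [PySem.List.pyGetD_natCast]
  rw [PySem.List.slice_to_natCast]
  have := foldB_eq names widths 0 [] hpre
  rw [zero_add] at this
  rw [this]
  simp [join_lineList]
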